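-- pv_equiv track=rewrite | github.com/loqlis/learn_python | 2025_04_08/task_10/utilities/group_users_by_logs.py | group_users_by_logs
-- ===== SOURCE A (Python) =====
-- def group_users_by_logs(logs_data: list[dict]) -> list:
--     grouped_user = {}
--     sorted_logs = sorted(logs_data, key=lambda log: log['time'])
--     for user in sorted_logs:
--         if grouped_user.get(user["user"]):
--             grouped_user[user["user"]].append(user)
--         else:
--             grouped_user[user["user"]] = [user]
--
--     return grouped_user
-- ===== SOURCE B (Python) =====
-- def group_users_by_logs(logs_data: list[dict]) -> list:
--     # One pass: group logs per user (decorated with time and original index),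
--     # then sort each bucket, then order the groups by their earliest entry.
--     buckets = {}
--     for i, log in enumerate(logs_data):
--         buckets.setdefault(log["user"], []).append((log["time"], i, log))
--     for entries in buckets.values():
--         entries.sort(key=lambda e: (e[0], e[1]))
--     return {user: [e[2] for e in entries]
--             for user, entries in sorted(buckets.items(), key=lambda kv: (kv[1][0][0], kv[1][0][1]))}
-- ===== Notes on version B (the rewrite author's own statement) =====
-- stated objective: alternative
-- what changed: B replaces A's global sort-then-group with a single grouping pass into per-user buckets (decorated with time and original index), a per-bucket sort, and a final ordering of the groups by their earliest entry.
import Mathlib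
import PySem

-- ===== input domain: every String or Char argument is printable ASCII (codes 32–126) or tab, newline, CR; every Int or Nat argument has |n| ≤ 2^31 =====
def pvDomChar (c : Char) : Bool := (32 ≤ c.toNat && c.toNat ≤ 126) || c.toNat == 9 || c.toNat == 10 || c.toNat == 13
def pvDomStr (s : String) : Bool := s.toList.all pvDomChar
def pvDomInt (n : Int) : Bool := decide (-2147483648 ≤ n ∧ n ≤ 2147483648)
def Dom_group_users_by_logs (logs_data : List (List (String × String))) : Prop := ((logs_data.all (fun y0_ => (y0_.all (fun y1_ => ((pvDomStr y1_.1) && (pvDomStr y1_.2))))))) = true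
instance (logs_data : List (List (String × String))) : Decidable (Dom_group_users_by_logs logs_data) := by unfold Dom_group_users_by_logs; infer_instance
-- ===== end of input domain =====

-- B groups the logs per user in one pass (decorated with time and original index), sorts each
-- bucket, and orders the groups by their earliest entry — instead of A's global sort then group.
-- Objective: alternative (same asymptotic cost, differently shaped computation).

-- ===== PORT A =====
def group_users_by_logs (logs_data : List (List (String × String))) : List (String × List (List (String × String))) :=
  let sorted_logs := PySem.List.sorted logs_data (fun log => (PySem.Dict.mk log).getD "time" "") false
  let grouped_user := sorted_logs.foldl (fun d log =>
    match d.get? ((PySem.Dict.mk log).getD "user" "") with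
    | some bs =>
        if bs.isEmpty then d.insert ((PySem.Dict.mk log).getD "user" "") [log]
        else d.insert ((PySem.Dict.mk log).getD "user" "") (bs ++ [log])
    | none => d.insert ((PySem.Dict.mk log).getD "user" "") [log]) PySem.Dict.empty
  grouped_user.items

-- ===== PORT B =====
def group_users_by_logs_alt (logs_data : List (List (String × String))) : List (String × List (List (String × String))) :=
  let buckets := (PySem.List.enumerate logs_data 0).foldl (fun d p =>
    d.modify ((PySem.Dict.mk p.2).getD "user" "") []
      (fun es => es ++ [((PySem.Dict.mk p.2).getD "time" "", p.1, p.2)])) PySem.Dict.empty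
  let buckets' := PySem.Dict.mk (buckets.items.map (fun kv =>
    (kv.1, PySem.List.sorted2 kv.2 (fun e => e.1) (fun e => e.2.1) false)))
  let ordered := PySem.List.sorted2 buckets'.items
    (fun kv => (kv.2.headD ("", 0, [])).1) (fun kv => (kv.2.headD ("", 0, [])).2.1) false
  (ordered.foldl (fun d kv => d.insert kv.1 (kv.2.map (fun e => e.2.2))) PySem.Dict.empty).items

-- ===== PRECONDITION & SPEC =====
-- Pre_ excludes exactly the logs that lack a "time" or "user" key, on which the Python A
-- (and B) raise KeyError.
def Pre_group_users_by_logs (logs_data : List (List (String × String))) : Prop :=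
  ∀ log ∈ logs_data, (PySem.Dict.mk log).contains "time" = true ∧ (PySem.Dict.mk log).contains "user" = true
instance (logs_data : List (List (String × String))) : Decidable (Pre_group_users_by_logs logs_data) := by
  unfold Pre_group_users_by_logs; infer_instance
def pvWitness_group_users_by_logs : (List (List (String × String))) :=
  [[("user", "alice"), ("time", "2")], [("user", "bob"), ("time", "1")]]

def Spec_group_users_by_logs (logs_data : List (List (String × String))) (out : List (String × List (List (String × String)))) : Prop := out = group_users_by_logs_alt logs_data
instance (logs_data : List (List (String × String))) (out : List (String × List (List (String × String)))) : Decidable (Spec_group_users_by_logs logs_data out) := by unfold Spec_group_users_by_logs; infer_instance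

-- ===== CLAIM (what is proved, stated in full; the proofs are below) =====
def Claim_equal_group_users_by_logs : Prop := ∀ (logs_data : List (List (String × String))), Dom_group_users_by_logs logs_data → Pre_group_users_by_logs logs_data → Spec_group_users_by_logs logs_data (group_users_by_logs logs_data)

-- ===== LEMMAS AND PROOFS =====

-- abbreviations used by the proofs (definitionally equal to the lambdas in the ports)
abbrev pvLog : Type := List (String × String)
def tmOf (log : pvLog) : String := (PySem.Dict.mk log).getD "time" ""
def usOf (log : pvLog) : String := (PySem.Dict.mk log).getD "user" ""
def wOf (p : Int × pvLog) : String := usOf p.2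
def lexK (p : Int × pvLog) : Lex (String × Int) := toLex (tmOf p.2, p.1)
def trip (p : Int × pvLog) : String × Int × pvLog := (tmOf p.2, p.1, p.2)
-- the decorated logs, strictly sorted by (time, original index)
def Tof (logs : List pvLog) : List (Int × pvLog) :=
  PySem.List.sorted (PySem.List.enumerate logs 0) lexK false
def Tc (logs : List pvLog) (c : String) : List (Int × pvLog) :=
  (Tof logs).filter (fun p => wOf p == c)
-- the users in order of their earliest decorated log
def Vof (logs : List pvLog) : List String := PySem.Set.ofList ((Tof logs).map wOf)
-- the common normal form both programs are proved equal to
def normForm (logs : List pvLog) : List (String × List pvLog) :=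
  (Vof logs).map (fun c => (c, (Tc logs c).map (fun p => p.2)))

-- generic insertBy / sorted facts ------------------------------------------------

theorem insertBy_nil {α : Type} (b : α → α → Bool) (x : α) :
    PySem.List.insertBy b x [] = [x] := rfl

theorem insertBy_cons {α : Type} (b : α → α → Bool) (x y : α) (ys : List α) :
    PySem.List.insertBy b x (y :: ys) =
      if b x y then x :: y :: ys else y :: PySem.List.insertBy b x ys := by
  simp [PySem.List.insertBy]

theorem insertBy_of_all {α : Type} (b : α → α → Bool) (x : α) (l : List α)
    (h : ∀ y ∈ l, b x y = true) : PySem.List.insertBy b x l = x :: l := by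
  cases l with
  | nil => rfl
  | cons y ys => rw [insertBy_cons, if_pos (h y (by simp))]

theorem map_insertBy {α β : Type} (b1 : α → α → Bool) (b2 : β → β → Bool) (g : α → β)
    (x : α) (l : List α) (h : ∀ y ∈ l, b1 x y = b2 (g x) (g y)) :
    (PySem.List.insertBy b1 x l).map g = PySem.List.insertBy b2 (g x) (l.map g) := by
  induction l with
  | nil => rfl
  | cons y ys ih =>
    rw [insertBy_cons, List.map_cons, insertBy_cons, ← h y (by simp)]
    by_cases hb : b1 x y
    · rw [if_pos hb, if_pos hb, List.map_cons, List.map_cons]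
    · rw [if_neg hb, if_neg hb, List.map_cons, ih (fun z hz => h z (by simp [hz]))]

theorem filter_insertBy_neg {α : Type} (b : α → α → Bool) (p : α → Bool) (x : α) (l : List α)
    (hp : p x = false) : (PySem.List.insertBy b x l).filter p = l.filter p := by
  induction l with
  | nil => simp [insertBy_nil, hp]
  | cons y ys ih =>
    rw [insertBy_cons]
    by_cases hb : b x y
    · rw [if_pos hb, List.filter_cons, hp, List.filter_cons]
      simp
    · rw [if_neg hb, List.filter_cons, List.filter_cons, ih]

theorem filter_insertBy_pos {α κ : Type} [LinearOrder κ] (key : α → κ) (p : α → Bool)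
    (x : α) (l : List α) (hp : p x = true) (hs : l.Pairwise (fun a b => key a ≤ key b)) :
    (PySem.List.insertBy (fun a b => decide (key a < key b)) x l).filter p =
      PySem.List.insertBy (fun a b => decide (key a < key b)) x (l.filter p) := by
  induction l with
  | nil => simp [PySem.List.insertBy, hp]
  | cons y ys ih =>
    have hys := (List.pairwise_cons.mp hs).1
    have htl := (List.pairwise_cons.mp hs).2
    rw [insertBy_cons]
    by_cases hb : key x < key y
    · simp only [decide_eq_true_eq, hb, if_pos]
      rw [List.filter_cons, List.filter_cons]
      by_cases hpy : p y
      · simp only [hpy, if_pos, hp]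
        rw [insertBy_cons]
        simp [hb]
      · simp only [hpy, Bool.false_eq_true, hp, if_pos]
        rw [insertBy_of_all]
        intro z hz
        have hz' := List.mem_of_mem_filter hz
        simp only [decide_eq_true_eq]
        exact lt_of_lt_of_le hb (hys z hz')
    · rw [if_neg (by simp [hb])]
      rw [List.filter_cons, List.filter_cons]
      by_cases hpy : p y
      · rw [if_pos hpy, if_pos hpy, insertBy_cons, if_neg (by simp [hb])]
        exact congrArg _ (ih htl)
      · rw [if_neg hpy, if_neg hpy]
        exact ih htl

theorem sorted_append_singleton {α κ : Type} [LT κ] [DecidableLT κ] (xs : List α) (x : α) (key : α → κ) :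
    PySem.List.sorted (xs ++ [x]) key false =
      PySem.List.insertBy (fun a b => decide (key a < key b)) x (PySem.List.sorted xs key false) := by
  rw [PySem.List.sorted_eq_foldl_insertBy, PySem.List.sorted_eq_foldl_insertBy, List.foldl_append]
  rfl

theorem filter_sorted {α κ : Type} [LinearOrder κ] (p : α → Bool) (xs : List α) (key : α → κ) :
    (PySem.List.sorted xs key false).filter p = PySem.List.sorted (xs.filter p) key false := by
  induction xs using List.reverseRecOn with
  | nil => rfl
  | append_singleton xs x ih =>
    rw [sorted_append_singleton, List.filter_append]
    by_cases hp : p x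
    · rw [filter_insertBy_pos key p x _ hp (PySem.List.sorted_pairwise xs key), ih]
      have : List.filter p [x] = [x] := by simp [hp]
      rw [this, sorted_append_singleton]
    · rw [filter_insertBy_neg _ p x _ (by simpa using hp), ih]
      have : List.filter p [x] = [] := by simp [hp]
      rw [this, List.append_nil]

theorem sorted2_eq_sorted_lex {α κ₁ κ₂ : Type} [LinearOrder κ₁] [LinearOrder κ₂]
    (xs : List α) (k1 : α → κ₁) (k2 : α → κ₂) :
    PySem.List.sorted2 xs k1 k2 false =
      PySem.List.sorted xs (fun x => toLex (k1 x, k2 x)) false := by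
  show List.foldl _ [] xs = List.foldl _ [] xs
  congr 1
  funext acc a
  congr 1
  funext x y
  by_cases h1 : k1 x < k1 y
  · simp [Prod.Lex.toLex_lt_toLex, h1]
  · by_cases h2 : k1 y < k1 x
    · simp [Prod.Lex.toLex_lt_toLex, h1, h2, ne_of_gt h2]
    · have he : k1 x = k1 y := le_antisymm (le_of_not_gt h2) (le_of_not_gt h1)
      simp [Prod.Lex.toLex_lt_toLex, he]

theorem sorted_map_comm {α β κ : Type} [LinearOrder κ] (g : α → β) (xs : List α) (key : β → κ) :
    PySem.List.sorted (xs.map g) key false = (PySem.List.sorted xs (fun x => key (g x)) false).map g := by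
  induction xs using List.reverseRecOn with
  | nil => rfl
  | append_singleton xs x ih =>
    rw [List.map_append, List.map_singleton, sorted_append_singleton, sorted_append_singleton, ih,
      map_insertBy (fun a b => decide (key (g a) < key (g b))) (fun a b => decide (key a < key b)) g x]
    intro y _; rfl

theorem pairwise_lt_of_le_of_nodup {α κ : Type} [LinearOrder κ] (f : α → κ) (l : List α)
    (hle : l.Pairwise (fun a b => f a ≤ f b)) (hnd : (l.map f).Nodup) :
    l.Pairwise (fun a b => f a < f b) := by
  have hne : l.Pairwise (fun a b => f a ≠ f b) := by
    rw [List.Nodup, List.pairwise_map] at hnd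
    exact hnd
  exact (hle.and hne).imp (fun h => lt_of_le_of_ne h.1 h.2)

theorem map_snd_sorted_enum {α κ : Type} [LinearOrder κ] (key : α → κ) (xs : List α) :
    (PySem.List.sorted (PySem.List.enumerate xs 0) (fun p => toLex (key p.2, p.1)) false).map (fun p => p.2)
      = PySem.List.sorted xs key false := by
  induction xs using List.reverseRecOn with
  | nil => rfl
  | append_singleton xs x ih =>
    have hcond : ∀ y ∈ PySem.List.sorted (PySem.List.enumerate xs 0) (fun p => toLex (key p.2, p.1)) false,
        (fun a b : Int × α => decide (toLex (key a.2, a.1) < toLex (key b.2, b.1))) ((xs.length : Int), x) y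
          = (fun a b => decide (key a < key b)) x y.2 := by
      intro y hy
      have hyE : y ∈ PySem.List.enumerate xs 0 := (PySem.List.mem_sorted _ _ _ _).mp hy
      obtain ⟨k, hk, rfl⟩ := (PySem.List.mem_enumerate_iff _ _ _).mp hyE
      have hlt : ¬ ((xs.length : Int) < 0 + (k : Int)) := by omega
      simp only [Prod.Lex.toLex_lt_toLex, decide_eq_decide]
      constructor
      · rintro (h | ⟨he, hi⟩)
        · exact h
        · exact absurd hi hlt
      · intro h; exact Or.inl h
    have hmap := map_insertBy (fun a b : Int × α => decide (toLex (key a.2, a.1) < toLex (key b.2, b.1)))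
      (fun a b => decide (key a < key b)) (fun p => p.2) ((xs.length : Int), x)
      (PySem.List.sorted (PySem.List.enumerate xs 0) (fun p => toLex (key p.2, p.1)) false) hcond
    rw [PySem.List.enumerate_append,
      show PySem.List.enumerate [x] (0 + (xs.length : Int)) = [((0 : Int) + (xs.length : Int), x)] by simp [PySem.List.enumerate_cons, PySem.List.enumerate_nil],
      show ((0:Int) + (xs.length : Int)) = ((xs.length : Int)) by omega,
      sorted_append_singleton, sorted_append_singleton, hmap, ih]

theorem ofList_map_pairwise_head {β γ : Type} [LinearOrder γ] (f : β → γ) (w : β → String) (b0 : β) :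
    ∀ (T : List β), T.Pairwise (fun a b => f a < f b) →
    (PySem.Set.ofList (T.map w)).Pairwise (fun c d =>
      f ((T.filter (fun b => w b == c)).headD b0) < f ((T.filter (fun b => w b == d)).headD b0)) := by
  intro T
  induction T with
  | nil => intro _; simp [PySem.Set.ofList]
  | cons b T ih =>
    intro hp
    have hb := (List.pairwise_cons.mp hp).1
    have htl := (List.pairwise_cons.mp hp).2
    rw [List.map_cons, PySem.Set.ofList_cons]
    refine List.pairwise_cons.mpr ⟨?_, ?_⟩
    · intro d hd
      obtain ⟨hdmem, hdne⟩ := (PySem.Set.mem_discard _ _ _).mp hd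
      have hcb : (List.filter (fun y => w y == w b) (b :: T)).headD b0 = b := by
        simp
      have hdf : (List.filter (fun y => w y == d) (b :: T)) = List.filter (fun y => w y == d) T := by
        rw [List.filter_cons]
        simp [Ne.symm hdne]
      obtain ⟨t, htT, htw⟩ := by
        have := (PySem.Set.mem_ofList _ _).mp hdmem
        exact List.mem_map.mp this
      have hne : List.filter (fun y => w y == d) T ≠ [] := by
        intro hnil
        have : t ∈ List.filter (fun y => w y == d) T := List.mem_filter.mpr ⟨htT, by simp [htw]⟩
        rw [hnil] at this; exact absurd this (List.not_mem_nil)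
      have hmem : (List.filter (fun y => w y == d) T).headD b0 ∈ List.filter (fun y => w y == d) T := by
        cases h : List.filter (fun y => w y == d) T with
        | nil => exact absurd h hne
        | cons a as => simp
      rw [hcb, hdf]
      exact hb _ (List.mem_of_mem_filter hmem)
    · have ihp := ih htl
      have hsub : ((PySem.Set.ofList (T.map w)).discard (w b)).Sublist (PySem.Set.ofList (T.map w)) := by
        unfold PySem.Set.discard
        exact List.filter_sublist
      refine (ihp.sublist hsub).imp_of_mem ?_
      intro c d hc hd hlt
      have hcne : c ≠ w b := ((PySem.Set.mem_discard _ _ _).mp hc).2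
      have hdne : d ≠ w b := ((PySem.Set.mem_discard _ _ _).mp hd).2
      have hcf : (List.filter (fun y => w y == c) (b :: T)) = List.filter (fun y => w y == c) T := by
        rw [List.filter_cons]; simp [Ne.symm hcne]
      have hdf : (List.filter (fun y => w y == d) (b :: T)) = List.filter (fun y => w y == d) T := by
        rw [List.filter_cons]; simp [Ne.symm hdne]
      rw [hcf, hdf]
      exact hlt

-- dict grouping-loop facts -------------------------------------------------------

theorem dict_items_eq {ν : Type} (d : PySem.Dict String ν) (h : d.keys.Nodup) (v0 : ν) :
    d.items = d.keys.map (fun k => (k, d.getD k v0)) := by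
  show d.items = (d.items.map (fun p => p.1)).map (fun k => (k, d.getD k v0))
  rw [List.map_map]
  have : ∀ p ∈ d.items, ((fun k => (k, d.getD k v0)) ∘ (fun p => p.1)) p = p := by
    rintro ⟨k, v⟩ hp
    simp only [Function.comp_apply]
    rw [PySem.Dict.getD_of_mem_items d hp h]
  rw [List.map_congr_left this, List.map_id']

theorem groupD_keys {β ν : Type} (L : List β) (k : β → String) (v : β → ν) :
    (L.foldl (fun d x => d.modify (k x) [] (fun bs => bs ++ [v x])) PySem.Dict.empty).keys
      = PySem.Set.ofList (L.map k) := by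
  rw [PySem.Dict.keys_foldl_modify_key L k [] (fun _ x bs => bs ++ [v x]) PySem.Dict.empty]
  simp [PySem.Dict.keys_empty, PySem.Set.update_nil_left]

theorem groupD_nodup {β ν : Type} (L : List β) (k : β → String) (v : β → ν) :
    (L.foldl (fun d x => d.modify (k x) [] (fun bs => bs ++ [v x])) PySem.Dict.empty).keys.Nodup := by
  exact PySem.Dict.nodup_keys_foldl_modify_key L k [] (fun _ x bs => bs ++ [v x]) PySem.Dict.empty
    (by simp [PySem.Dict.keys_empty])

theorem groupD_getD {β ν : Type} (L : List β) (k : β → String) (v : β → ν) (c : String) :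
    (L.foldl (fun d x => d.modify (k x) [] (fun bs => bs ++ [v x])) PySem.Dict.empty).getD c []
      = (L.filter (fun x => k x == c)).map v := by
  have h1 : L.foldl (fun d x => d.modify (k x) [] (fun bs => bs ++ [v x])) PySem.Dict.empty
      = (L.map (fun x => (k x, v x))).foldl (fun d p => d.modify p.1 [] (fun bs => bs ++ [p.2])) PySem.Dict.empty := by
    rw [List.foldl_map]
  rw [h1, PySem.Dict.getD_foldl_modify_append, List.filter_map]
  simp [Function.comp_def, PySem.Dict.getD_empty]

-- program-specific assembly ------------------------------------------------------

theorem groupA_fold_eq (S : List pvLog) :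
    S.foldl (fun d log =>
      match d.get? (usOf log) with
      | some bs =>
          if bs.isEmpty then d.insert (usOf log) [log]
          else d.insert (usOf log) (bs ++ [log])
      | none => d.insert (usOf log) [log]) PySem.Dict.empty
    = S.foldl (fun d log => d.modify (usOf log) [] (fun bs => bs ++ [log])) PySem.Dict.empty := by
  congr 1
  funext d log
  show _ = d.insert (usOf log) ((d.getD (usOf log) []) ++ [log])
  cases hg : d.get? (usOf log) with
  | none =>
    dsimp only
    rw [PySem.Dict.getD_of_get?_eq_none _ _ hg, List.nil_append]
  | some bs =>
    dsimp only
    rw [PySem.Dict.getD_of_get?_eq_some _ _ hg]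
    cases bs with
    | nil => simp
    | cons b bs => simp

theorem A_char (logs : List pvLog) : group_users_by_logs logs = normForm logs := by
  have h : group_users_by_logs logs =
      ((PySem.List.sorted logs tmOf false).foldl (fun d log =>
        match d.get? (usOf log) with
        | some bs =>
            if bs.isEmpty then d.insert (usOf log) [log]
            else d.insert (usOf log) (bs ++ [log])
        | none => d.insert (usOf log) [log]) PySem.Dict.empty).items := rfl
  rw [h, groupA_fold_eq,
    dict_items_eq _ (groupD_nodup _ _ _) ([] : List pvLog), groupD_keys]
  simp only [groupD_getD]
  have hS : PySem.List.sorted logs tmOf false = (Tof logs).map (fun p => p.2) := by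
    unfold Tof lexK
    exact (map_snd_sorted_enum tmOf logs).symm
  rw [hS]
  unfold normForm Vof Tc wOf
  rw [List.map_map]
  apply List.map_congr_left
  intro c _
  rw [List.filter_map]
  simp [Function.comp_def]

theorem inner_eq (logs : List pvLog) (c : String) :
    PySem.List.sorted2 (((PySem.List.enumerate logs 0).filter (fun p => wOf p == c)).map trip)
      (fun e => e.1) (fun e => e.2.1) false = (Tc logs c).map trip := by
  rw [sorted2_eq_sorted_lex, sorted_map_comm]
  unfold Tc Tof
  rw [filter_sorted]
  rfl


theorem B_char (logs : List pvLog) : group_users_by_logs_alt logs = normForm logs := by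
  have h : group_users_by_logs_alt logs =
      ((PySem.List.sorted2
          (((PySem.List.enumerate logs 0).foldl (fun d p =>
              d.modify (wOf p) [] (fun es => es ++ [trip p])) PySem.Dict.empty).items.map (fun kv =>
            (kv.1, PySem.List.sorted2 kv.2 (fun e => e.1) (fun e => e.2.1) false)))
          (fun kv => (kv.2.headD ("", 0, [])).1) (fun kv => (kv.2.headD ("", 0, [])).2.1) false).foldl
        (fun d kv => d.insert kv.1 (kv.2.map (fun e => e.2.2))) PySem.Dict.empty).items := rfl
  rw [h, dict_items_eq _ (groupD_nodup _ _ _) ([] : List (String × Int × pvLog)), groupD_keys]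
  simp only [groupD_getD]
  rw [List.map_map]
  simp only [Function.comp_def, inner_eq]
  rw [sorted2_eq_sorted_lex]
  have hTE : (Tof logs).Perm (PySem.List.enumerate logs 0) :=
    PySem.List.sorted_perm (PySem.List.enumerate logs 0) lexK false
  have hperm : (Vof logs).Perm (PySem.Set.ofList ((PySem.List.enumerate logs 0).map wOf)) := by
    refine (List.perm_ext_iff_of_nodup (PySem.Set.nodup_ofList _) (PySem.Set.nodup_ofList _)).mpr ?_
    intro a
    rw [PySem.Set.mem_ofList, PySem.Set.mem_ofList]
    exact (hTE.map wOf).mem_iff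
  have hTs : (Tof logs).Pairwise (fun a b => lexK a < lexK b) := by
    refine pairwise_lt_of_le_of_nodup lexK _ (PySem.List.sorted_pairwise _ _) ?_
    have hEne : (PySem.List.enumerate logs 0).Pairwise (fun p q => lexK p ≠ lexK q) := by
      refine (PySem.List.pairwise_lt_enumerate logs 0).imp ?_
      intro p q hlt heq
      have : p.1 = q.1 := congrArg (fun x => (ofLex x).2) heq
      omega
    have hTne : (Tof logs).Pairwise (fun p q => lexK p ≠ lexK q) :=
      ((hTE.pairwise_iff (fun h => h.symm)).mpr hEne)
    exact (List.pairwise_map.mpr hTne : ((Tof logs).map lexK).Pairwise (fun a b => a ≠ b))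
  have hhead := ofList_map_pairwise_head lexK wOf ((0 : Int), ([] : pvLog)) (Tof logs) hTs
  have hne : ∀ c ∈ Vof logs, Tc logs c ≠ [] := by
    intro c hc
    obtain ⟨p, hpT, hpw⟩ := List.mem_map.mp ((PySem.Set.mem_ofList _ _).mp hc)
    intro hnil
    have : p ∈ Tc logs c := List.mem_filter.mpr ⟨hpT, by simp [hpw]⟩
    rw [hnil] at this
    exact absurd this (List.not_mem_nil)
  have hKL : ∀ c ∈ Vof logs,
      toLex (((((Tc logs c).map trip).headD ("", 0, [])).1, (((Tc logs c).map trip).headD ("", 0, [])).2.1))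
        = lexK ((Tc logs c).headD ((0 : Int), ([] : pvLog))) := by
    intro c hc
    cases hT : Tc logs c with
    | nil => exact absurd hT (hne c hc)
    | cons a as => rfl
  have hpw : ((Vof logs).map (fun c => (c, (Tc logs c).map trip))).Pairwise
      (fun a b => (fun kv => toLex (((kv.2.headD ("", 0, [])).1, (kv.2.headD ("", 0, [])).2.1))) a
        < (fun kv => toLex (((kv.2.headD ("", 0, [])).1, (kv.2.headD ("", 0, [])).2.1))) b) := by
    rw [List.pairwise_map]
    refine hhead.imp_of_mem ?_
    intro c d hc hd hlt
    show toLex _ < toLex _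
    rw [hKL c hc, hKL d hd]
    exact hlt
  have hord := PySem.List.sorted_eq_of_perm_of_pairwise_lt
    ((PySem.Set.ofList ((PySem.List.enumerate logs 0).map wOf)).map (fun c => (c, (Tc logs c).map trip)))
    ((Vof logs).map (fun c => (c, (Tc logs c).map trip)))
    (fun kv => toLex (((kv.2.headD ("", 0, [])).1, (kv.2.headD ("", 0, [])).2.1)))
    (hperm.map _) hpw
  rw [hord]
  have hfresh := PySem.Dict.items_foldl_insert_fresh
    (l := (Vof logs).map (fun c => (c, (Tc logs c).map trip)))
    (k := fun kv => kv.1) (v := fun kv => kv.2.map (fun e => e.2.2)) (d := (PySem.Dict.empty : PySem.Dict String (List pvLog)))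
    (by intro a _; simp [PySem.Dict.contains_empty])
    (by rw [List.map_map]
        simp only [Function.comp_def, List.map_id']
        exact PySem.Set.nodup_ofList ((Tof logs).map wOf))
  beta_reduce at hfresh
  rw [hfresh]
  unfold normForm
  rw [List.map_map]
  simp only [PySem.Dict.empty, List.nil_append]
  apply List.map_congr_left
  intro c _
  simp only [Function.comp_def, List.map_map]
  refine congrArg _ (List.map_congr_left ?_)
  rintro ⟨a, b⟩ _
  rfl


-- ===== VERDICT (by name: the statement is the Claim_ definition above) =====
theorem group_users_by_logs_spec : Claim_equal_group_users_by_logs := by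
  intro logs _ _
  unfold Spec_group_users_by_logs
  rw [A_char, B_char]
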